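-- pv_equiv track=rewrite | github.com/kemsweetsun/MYproject | get_ssq_seg.py | omission_analysis
-- ===== SOURCE A (Python) =====
-- from typing import List, Optional, Dict
--
-- def omission_analysis(results: List[Dict]) -> Dict[str, Dict[str, int]]:
--     """
--     完善后的遗漏值分析(分别统计红球和蓝球)
--     :param results: 历史开奖结果列表
--     :return: 包含红球和蓝球遗漏值的字典
--     """
--     # 初始化所有红球(01-33)和蓝球(01-16)
--     red_omission = {str(i).zfill(2): 0 for i in range(1, 34)}
--     blue_omission = {str(i).zfill(2): 0 for i in range(1, 17)}
--
--     for result in results: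
--         current_reds = set(result['red'].split(','))
--         current_blue = result['blue']
--
--         # 更新红球遗漏值
--         for red in red_omission:
--             if red in current_reds:
--                 red_omission[red] = 0  # 本期出现的红球重置为0
--             else:
--                 red_omission[red] += 1  # 未出现的红球遗漏值+1
--
--         # 更新蓝球遗漏值
--         for blue in blue_omission:
--             if blue == current_blue:
--                 blue_omission[blue] = 0  # 本期出现的蓝球重置为0
--             else:
--                 blue_omission[blue] += 1  # 未出现的蓝球遗漏值+1
--
--     return {
--         'red': red_omission,
--         'blue': blue_omission
--     }
-- ===== SOURCE B (Python) =====
-- def omission_analysis(results):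
--     """Single pass recording each ball's last-seen draw index, then closed-form
--     omission = n-1-last_seen (or n if never drawn)."""
--     n = len(results)
--     last_red = {}
--     last_blue = {}
--     for i, result in enumerate(results):
--         for red in result['red'].split(','):
--             last_red[red] = i
--         last_blue[result['blue']] = i
--     red_keys = [str(i).zfill(2) for i in range(1, 34)]
--     blue_keys = [str(i).zfill(2) for i in range(1, 17)]
--     return {
--         'red': {k: (n - 1 - last_red[k] if k in last_red else n) for k in red_keys},
--         'blue': {k: (n - 1 - last_blue[k] if k in last_blue else n) for k in blue_keys},
--     }
-- ===== Notes on version B (the rewrite author's own statement) =====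
-- stated objective: faster
-- what changed: Instead of updating all 49 counters on every draw, B makes one pass recording each ball's last-seen draw index and then computes each omission by the closed form n-1-last_seen (n if never drawn).
import Mathlib
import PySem

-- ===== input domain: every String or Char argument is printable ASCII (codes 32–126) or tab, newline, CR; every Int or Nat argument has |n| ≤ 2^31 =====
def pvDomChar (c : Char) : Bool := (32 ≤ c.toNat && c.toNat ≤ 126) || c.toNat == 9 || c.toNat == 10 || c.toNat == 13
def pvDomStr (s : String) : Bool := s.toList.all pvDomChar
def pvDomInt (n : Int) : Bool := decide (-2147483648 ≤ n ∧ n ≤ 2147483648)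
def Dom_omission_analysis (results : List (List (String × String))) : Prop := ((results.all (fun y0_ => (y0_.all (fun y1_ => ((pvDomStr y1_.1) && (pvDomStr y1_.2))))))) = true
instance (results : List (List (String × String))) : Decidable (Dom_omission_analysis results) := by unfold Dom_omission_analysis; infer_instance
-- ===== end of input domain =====

-- B replaces A's per-draw update of all 49 counters by one pass recording last-seen
-- indices plus a closed form n-1-last_seen; equivalence of RETURN values on Pre_.

-- shared helper: Python's result['red'] (dict lookup, first match); total via default,
-- Pre_ guarantees the key is present so the default is never used on admitted inputs
def pvLookupD (r : List (String × String)) (k : String) : String :=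
  (PySem.Dict.mk r).getD k ""

-- the fixed key lists {str(i).zfill(2) : i in range(1,34)} / range(1,17)
def pvRedKeys : List String :=
  (PySem.List.pyRange 1 34 1).map (fun i => PySem.Str.zfill (PySem.Int.toStr i) 2)
def pvBlueKeys : List String :=
  (PySem.List.pyRange 1 17 1).map (fun i => PySem.Str.zfill (PySem.Int.toStr i) 2)

-- ===== PORT A =====
-- A's 'for red in red_omission: red_omission[red] = …' rewrites every value of the
-- fixed-key dict in order: ported as a map over the (key, value) list.
def omission_analysis (results : List (List (String × String))) : List (String × List (String × Int)) :=
  let init_red : List (String × Int) := pvRedKeys.map (fun k => (k, 0))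
  let init_blue : List (String × Int) := pvBlueKeys.map (fun k => (k, 0))
  let fin := results.foldl (fun (st : List (String × Int) × List (String × Int)) result =>
    let current_reds := PySem.Set.ofList ((PySem.Str.split? (pvLookupD result "red") ",").getD [])
    let current_blue := pvLookupD result "blue"
    ( st.1.map (fun kv => (kv.1, if PySem.Set.contains current_reds kv.1 then 0 else kv.2 + 1)),
      st.2.map (fun kv => (kv.1, if kv.1 == current_blue then 0 else kv.2 + 1)) ))
    (init_red, init_blue)
  [("red", fin.1), ("blue", fin.2)]

-- ===== PORT B =====
def omission_analysis_alt (results : List (List (String × String))) : List (String × List (String × Int)) :=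
  let n : Int := results.length
  let last := (PySem.List.enumerate results 0).foldl
    (fun (st : PySem.Dict String Int × PySem.Dict String Int) ir =>
      ( ((PySem.Str.split? (pvLookupD ir.2 "red") ",").getD []).foldl (fun d red => d.insert red ir.1) st.1,
        st.2.insert (pvLookupD ir.2 "blue") ir.1 ))
    (PySem.Dict.empty, PySem.Dict.empty)
  [("red", pvRedKeys.map (fun k => (k, match last.1.get? k with | some i => n - 1 - i | none => n))),
   ("blue", pvBlueKeys.map (fun k => (k, match last.2.get? k with | some i => n - 1 - i | none => n)))]

-- ===== PRECONDITION & SPEC =====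
-- Pre_ excludes exactly the draws missing a 'red' or 'blue' key, on which Python A raises KeyError.
def Pre_omission_analysis (results : List (List (String × String))) : Prop :=
  (results.all (fun r => (PySem.Dict.mk r).contains "red" && (PySem.Dict.mk r).contains "blue")) = true
instance (results : List (List (String × String))) : Decidable (Pre_omission_analysis results) := by unfold Pre_omission_analysis; infer_instance
def pvWitness_omission_analysis : (List (List (String × String))) :=
  [[("red", "01,02,03,04,05,06"), ("blue", "07")], [("red", "01,09,10,11,12,13"), ("blue", "07")]]
def Spec_omission_analysis (results : List (List (String × String))) (out : List (String × List (String × Int))) : Prop := out = omission_analysis_alt results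
instance (results : List (List (String × String))) (out : List (String × List (String × Int))) : Decidable (Spec_omission_analysis results out) := by unfold Spec_omission_analysis; infer_instance

-- ===== CLAIM (what is proved, stated in full; the proofs are below) =====
def Claim_equal_omission_analysis : Prop := ∀ (results : List (List (String × String))), Dom_omission_analysis results → Pre_omission_analysis results → Spec_omission_analysis results (omission_analysis results)

-- ===== LEMMAS AND PROOFS =====

-- a fold that updates the two components of a pair independently splits
theorem pvFoldPair {α β γ : Type} (rs : List α) (f : α → β → β) (g : α → γ → γ) (a : β) (b : γ) :
    rs.foldl (fun st r => (f r st.1, g r st.2)) (a, b)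
      = (rs.foldl (fun x r => f r x) a, rs.foldl (fun x r => g r x) b) := by
  induction rs generalizing a b with
  | nil => rfl
  | cons r rs ih => simpa using ih (f r a) (g r b)

-- a fold mapping every value of a fixed-key list reduces to an independent per-key fold
theorem pvFoldMapKeys {α : Type} (rs : List α) (keys : List String)
    (step : α → String → Int → Int) (f0 : String → Int) :
    rs.foldl (fun l r => l.map (fun kv => (kv.1, step r kv.1 kv.2))) (keys.map (fun k => (k, f0 k)))
      = keys.map (fun k => (k, rs.foldl (fun v r => step r k v) (f0 k))) := by
  induction rs generalizing f0 with
  | nil => rfl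
  | cons r rs ih =>
    have h1 : (keys.map (fun k => (k, f0 k))).map (fun kv => (kv.1, step r kv.1 kv.2))
        = keys.map (fun k => (k, step r k (f0 k))) := by
      simp [List.map_map]
    simpa [h1] using ih (fun k => step r k (f0 k))

-- inserting one value i at all keys of xs: lookup afterwards
theorem pvGetFoldInsert (xs : List String) (i : Int) (d : PySem.Dict String Int) (k : String) :
    (xs.foldl (fun d x => d.insert x i) d).get? k
      = if k ∈ xs then some i else d.get? k := by
  induction xs generalizing d with
  | nil => simp
  | cons x xs ih =>
    by_cases hk : k ∈ xs
    · simp [List.foldl_cons, ih, hk]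
    · by_cases hx : k = x
      · subst hx
        rw [List.foldl_cons, ih]
        simp [hk, PySem.Dict.get?_insert_self]
      · rw [List.foldl_cons, ih]
        simp [hk, hx, PySem.Dict.get?_insert_of_ne d _ hx]

-- core: A's per-key counter equals B's last-seen-index closed form
theorem pvCore {a : Type} (rs : List a) (balls : a → List String) (k : String) (c0 : Int) :
    rs.foldl (fun v r => if k ∈ balls r then 0 else v + 1) c0
      = (match ((PySem.List.enumerate rs 0).foldl
            (fun (d : PySem.Dict String Int) ir => (balls ir.2).foldl (fun d x => d.insert x ir.1) d)
            PySem.Dict.empty).get? k with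
         | some i => (rs.length : Int) - 1 - i
         | none => c0 + rs.length) := by
  induction rs using List.reverseRecOn generalizing c0 with
  | nil => simp [PySem.List.enumerate]
  | append_singleton rs r ih =>
    rw [List.foldl_append, PySem.List.enumerate_append, List.foldl_append]
    simp only [PySem.List.enumerate, List.foldl_cons, List.foldl_nil]
    rw [pvGetFoldInsert]
    by_cases hk : k ∈ balls r
    · simp [hk]
    · rw [if_neg hk, if_neg hk, ih c0]
      cases h : ((PySem.List.enumerate rs 0).foldl
            (fun (d : PySem.Dict String Int) ir => (balls ir.2).foldl (fun d x => d.insert x ir.1) d)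
            PySem.Dict.empty).get? k with
      | none => simp; ring
      | some i => simp; ring

-- ===== VERDICT (by name: the statement is the Claim_ definition above) =====
theorem omission_analysis_spec : Claim_equal_omission_analysis := by
  intro results _ _
  unfold Spec_omission_analysis
  simp only [omission_analysis, omission_analysis_alt]
  rw [pvFoldPair, pvFoldMapKeys results pvRedKeys
        (fun r k v => if PySem.Set.contains (PySem.Set.ofList ((PySem.Str.split? (pvLookupD r "red") ",").getD [])) k then 0 else v + 1)
        (fun _ => 0),
      pvFoldMapKeys results pvBlueKeys
        (fun r k v => if k == pvLookupD r "blue" then 0 else v + 1)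
        (fun _ => 0),
      pvFoldPair (PySem.List.enumerate results 0)
        (fun ir (x : PySem.Dict String Int) => List.foldl (fun d red => d.insert red ir.1) x ((PySem.Str.split? (pvLookupD ir.2 "red") ",").getD []))
        (fun ir (x : PySem.Dict String Int) => x.insert (pvLookupD ir.2 "blue") ir.1)
        PySem.Dict.empty PySem.Dict.empty]
  have hred : ∀ k : String,
      List.foldl (fun (v : Int) r => if (PySem.Set.ofList ((PySem.Str.split? (pvLookupD r "red") ",").getD [])).contains k = true then 0 else v + 1) 0 results
        = (match (List.foldl (fun (d : PySem.Dict String Int) ir => List.foldl (fun d red => d.insert red ir.1) d ((PySem.Str.split? (pvLookupD ir.2 "red") ",").getD [])) PySem.Dict.empty (PySem.List.enumerate results 0)).get? k with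
           | some i => (results.length : Int) - 1 - i
           | none => (results.length : Int)) := by
    intro k
    have h := pvCore results (fun r => (PySem.Str.split? (pvLookupD r "red") ",").getD []) k 0
    simp only [zero_add] at h
    rw [← h]
    apply PySem.List.foldl_congr_mem
    intro v r _
    by_cases hm : k ∈ (PySem.Str.split? (pvLookupD r "red") ",").getD []
    · simp [hm, PySem.Set.mem_ofList]
    · simp [hm, PySem.Set.mem_ofList]
  have hblue : ∀ k : String,
      List.foldl (fun (v : Int) r => if (k == pvLookupD r "blue") = true then 0 else v + 1) 0 results
        = (match (List.foldl (fun (d : PySem.Dict String Int) ir => d.insert (pvLookupD ir.2 "blue") ir.1) PySem.Dict.empty (PySem.List.enumerate results 0)).get? k with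
           | some i => (results.length : Int) - 1 - i
           | none => (results.length : Int)) := by
    intro k
    have h := pvCore results (fun r => [pvLookupD r "blue"]) k 0
    simp only [zero_add, List.mem_singleton, List.foldl_cons, List.foldl_nil] at h
    rw [← h]
    apply PySem.List.foldl_congr_mem
    intro v r _
    by_cases hm : k = pvLookupD r "blue" <;> simp [hm]
  simp only [hred, hblue]
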